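-- pv_equiv track=rewrite | github.com/godekdls/bio-informatics | find_motif.py | get_candidate_regulatory_motif
-- ===== SOURCE A (Python) =====
-- def get_symbol_count_dictionary(motifs):
--     # init count dictionary
--     count = {}
--     motif_length = len(motifs[0])  # suppose every string in motifs has same length
--     for symbol in "ACGT":
--         count[symbol] = []
--         for j in range(motif_length):
--             count[symbol].append(0)
--
--     motif_count = len(motifs)
--     for i in range(motif_count):
--         for j in range(motif_length):
--             symbol = motifs[i][j]
--             count[symbol][j] += 1
--
--     return count
--
-- def get_candidate_regulatory_motif(motifs):
--     count = get_symbol_count_dictionary(motifs)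
--     motif_length = len(motifs[0])
--
--     candidate = ""
--     for j in range(motif_length):
--         m = 0
--         frequentSymbol = ""
--         for symbol in "ACGT":
--             if count[symbol][j] > m:
--                 m = count[symbol][j]
--                 frequentSymbol = symbol
--         candidate += frequentSymbol
--     return candidate
-- ===== SOURCE B (Python) =====
-- def get_candidate_regulatory_motif(motifs):
--     consensus = []
--     for j in range(len(motifs[0])):
--         column = [s[j] for s in motifs]
--         consensus.append(max("ACGT", key=column.count))
--     return "".join(consensus)
-- ===== Notes on version B (the rewrite author's own statement) =====
-- stated objective: simpler
-- what changed: Drops the separate 4xL count-matrix construction; a single column-major pass extracts each column and picks its consensus directly with max('ACGT', key=column.count).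
import Mathlib
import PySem

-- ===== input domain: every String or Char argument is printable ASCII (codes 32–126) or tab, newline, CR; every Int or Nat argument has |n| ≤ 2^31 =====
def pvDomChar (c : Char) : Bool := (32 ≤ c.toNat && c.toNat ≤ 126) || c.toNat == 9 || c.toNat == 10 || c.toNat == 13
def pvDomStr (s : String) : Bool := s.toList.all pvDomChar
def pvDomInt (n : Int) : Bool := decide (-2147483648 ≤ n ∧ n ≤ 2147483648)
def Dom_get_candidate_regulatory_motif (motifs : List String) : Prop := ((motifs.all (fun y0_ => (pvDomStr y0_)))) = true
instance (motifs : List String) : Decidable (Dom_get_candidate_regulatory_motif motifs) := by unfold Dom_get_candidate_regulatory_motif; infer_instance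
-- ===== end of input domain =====

-- B drops A's separate count-matrix phase: one column-major pass picks each column's
-- consensus directly via max('ACGT', key=column.count).  Objective: simpler.

-- ===== PORT A =====
def get_symbol_count_dictionary (motifs : List String) : PySem.Dict Char (List Int) :=
  let motif_length := PySem.Str.len (PySem.List.pyGetD motifs 0 "")   -- motifs[0] raises on []; excluded by Pre_
  let count := List.foldl (fun (d : PySem.Dict Char (List Int)) symbol =>
      d.insert symbol (List.foldl (fun l (_ : Int) => l ++ [(0 : Int)]) []
        (PySem.List.pyRange 0 motif_length)))
    PySem.Dict.empty "ACGT".toList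
  let motif_count := PySem.List.len motifs
  List.foldl (fun d i =>
      List.foldl (fun (d : PySem.Dict Char (List Int)) j =>
          let symbol := PySem.List.pyGetD (PySem.List.pyGetD motifs i "").toList j ' '
          -- count[symbol][j] += 1 ; KeyError / IndexError excluded by Pre_
          d.modify symbol [] (fun l => PySem.List.pySetD l j (PySem.List.pyGetD l j 0 + 1)))
        d (PySem.List.pyRange 0 motif_length))
    count (PySem.List.pyRange 0 motif_count)

def get_candidate_regulatory_motif (motifs : List String) : String :=
  let count := get_symbol_count_dictionary motifs
  let motif_length := PySem.Str.len (PySem.List.pyGetD motifs 0 "")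
  List.foldl (fun candidate j =>
      let p := List.foldl (fun (p : Int × String) symbol =>
          if PySem.List.pyGetD (count.getD symbol []) j 0 > p.1
          then (PySem.List.pyGetD (count.getD symbol []) j 0, String.singleton symbol)
          else p)
        ((0 : Int), "") "ACGT".toList
      candidate ++ p.2)
    "" (PySem.List.pyRange 0 motif_length)

-- ===== PORT B =====
def get_candidate_regulatory_motif_alt (motifs : List String) : String :=
  let consensus := List.foldl (fun (acc : List Char) j =>
      let column := motifs.map (fun s => PySem.List.pyGetD s.toList j ' ')
      acc ++ [PySem.List.maxD "ACGT".toList (fun sym => (column.count sym : Int)) 'A'])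
    [] (PySem.List.pyRange 0 (PySem.Str.len (PySem.List.pyGetD motifs 0 "")))
  String.ofList consensus

-- ===== PRECONDITION & SPEC =====
-- Pre_ is exactly where A returns normally: motifs nonempty (motifs[0] raises IndexError on []),
-- every motif at least as long as motifs[0] (else IndexError), and every character in the first
-- len(motifs[0]) columns one of 'ACGT' (else KeyError in count[symbol][j] += 1).
def Pre_get_candidate_regulatory_motif (motifs : List String) : Prop :=
  motifs ≠ [] ∧ ∀ s ∈ motifs, (motifs.headD "").toList.length ≤ s.toList.length ∧
    ∀ j < (motifs.headD "").toList.length, s.toList.getD j ' ' ∈ "ACGT".toList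
instance (motifs : List String) : Decidable (Pre_get_candidate_regulatory_motif motifs) := by
  unfold Pre_get_candidate_regulatory_motif; infer_instance

def pvWitness_get_candidate_regulatory_motif : List String := ["ACG", "ATG", "CTG"]

def Spec_get_candidate_regulatory_motif (motifs : List String) (out : String) : Prop := out = get_candidate_regulatory_motif_alt motifs
instance (motifs : List String) (out : String) : Decidable (Spec_get_candidate_regulatory_motif motifs out) := by unfold Spec_get_candidate_regulatory_motif; infer_instance

-- ===== CLAIM (what is proved, stated in full; the proofs are below) =====
def Claim_equal_get_candidate_regulatory_motif : Prop := ∀ (motifs : List String), Dom_get_candidate_regulatory_motif motifs → Pre_get_candidate_regulatory_motif motifs → Spec_get_candidate_regulatory_motif motifs (get_candidate_regulatory_motif motifs)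

-- ===== LEMMAS AND PROOFS =====

def rowStep (cs : List Char) (d : PySem.Dict Char (List Int)) (i : Nat) : PySem.Dict Char (List Int) :=
  d.modify (cs.getD i ' ') [] (fun l => PySem.List.pySetD l (i : Int) (PySem.List.pyGetD l (i : Int) 0 + 1))

lemma entry_inner (L : Nat) (cs : List Char) (js : List Nat)
    (hjs : ∀ i ∈ js, i < L) (hnd : js.Nodup) (d : PySem.Dict Char (List Int))
    (hd : ∀ sym ∈ "ACGT".toList, (d.getD sym []).length = L) :
    ∀ sym ∈ "ACGT".toList,
      ((js.foldl (rowStep cs) d).getD sym []).length = L ∧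
      ∀ j : Nat, PySem.List.pyGetD ((js.foldl (rowStep cs) d).getD sym []) (j : Int) 0
        = PySem.List.pyGetD (d.getD sym []) (j : Int) 0
          + (if j ∈ js ∧ cs.getD j ' ' = sym then 1 else 0) := by
  induction js generalizing d with
  | nil =>
    intro sym hsym
    refine ⟨hd sym hsym, fun j => ?_⟩
    rw [List.foldl_nil, if_neg (fun hc => by simpa using hc.1)]
    ring
  | cons i t ih =>
    intro sym hsym
    have hiL : i < L := hjs i (by simp)
    have hd' : ∀ sym' ∈ "ACGT".toList, ((rowStep cs d i).getD sym' []).length = L := by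
      intro sym' hsym'
      rw [rowStep, PySem.Dict.getD_modify]
      by_cases h : sym' = cs.getD i ' '
      · rw [if_pos h, PySem.List.length_pySetD]
        subst h; exact hd _ hsym'
      · rw [if_neg h]; exact hd _ hsym'
    have ih' := ih (fun x hx => hjs x (by simp [hx])) hnd.of_cons (rowStep cs d i) hd' sym hsym
    refine ⟨by simpa using ih'.1, ?_⟩
    intro j
    have hnotmem : i ∉ t := (List.nodup_cons.mp hnd).1
    rw [List.foldl_cons, ih'.2 j]
    have hE : PySem.List.pyGetD ((rowStep cs d i).getD sym []) (j : Int) 0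
        = PySem.List.pyGetD (d.getD sym []) (j : Int) 0
          + (if sym = cs.getD i ' ' ∧ j = i then 1 else 0) := by
      rw [rowStep, PySem.Dict.getD_modify]
      by_cases h : sym = cs.getD i ' '
      · rw [if_pos h]
        rw [PySem.List.pyGetD_pySetD_natCast _ i j _ _ (by rw [hd _ (h ▸ hsym)]; exact hiL)]
        by_cases hji : j = i
        · rw [if_pos hji, if_pos ⟨h, hji⟩, hji, ← h]
        · rw [if_neg hji, if_neg (fun hc => hji hc.2), ← h]
          ring
      · rw [if_neg h, if_neg (fun hc => h hc.1)]
        ring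
    rw [hE]
    by_cases hji : j = i
    · by_cases h : cs.getD j ' ' = sym
      · rw [if_pos ⟨h.symm.trans (by rw [hji]), hji⟩,
            if_neg (fun hc => hnotmem (hji ▸ hc.1)),
            if_pos ⟨List.mem_cons.mpr (Or.inl hji), h⟩]
        ring
      · rw [if_neg (fun hc => h (show cs.getD j ' ' = sym by rw [hji]; exact hc.1.symm)),
            if_neg (fun hc => h hc.2),
            if_neg (fun hc => h hc.2)]
        ring
    · rw [if_neg (fun hc => hji hc.2)]
      by_cases h : cs.getD j ' ' = sym
      · by_cases hjt : j ∈ t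
        · rw [if_pos ⟨hjt, h⟩, if_pos ⟨List.mem_cons.mpr (Or.inr hjt), h⟩]
          ring
        · rw [if_neg (fun hc => hjt hc.1),
            if_neg (fun hc => (List.mem_cons.mp hc.1).elim hji hjt)]
          ring
      · rw [if_neg (fun hc => h hc.2), if_neg (fun hc => h hc.2)]
        ring

lemma entry_outer (L : Nat) (rows : List String) (d : PySem.Dict Char (List Int))
    (hd : ∀ sym ∈ "ACGT".toList, (d.getD sym []).length = L) :
    ∀ sym ∈ "ACGT".toList,
      ((rows.foldl (fun d s => List.foldl (rowStep s.toList) d (List.range L)) d).getD sym []).length = L ∧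
      ∀ j < L, PySem.List.pyGetD ((rows.foldl (fun d s => List.foldl (rowStep s.toList) d (List.range L)) d).getD sym []) (j : Int) 0
        = PySem.List.pyGetD (d.getD sym []) (j : Int) 0
          + (rows.countP (fun s => s.toList.getD j ' ' == sym) : Int) := by
  induction rows generalizing d with
  | nil => intro sym hsym; exact ⟨hd sym hsym, fun j _ => by simp⟩
  | cons s rs ih =>
    intro sym hsym
    have hinner := entry_inner L s.toList (List.range L) (fun i hi => List.mem_range.mp hi)
      (List.nodup_range) d hd sym hsym
    have hd' : ∀ sym' ∈ "ACGT".toList, ((List.foldl (rowStep s.toList) d (List.range L)).getD sym' []).length = L :=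
      fun sym' hsym' => (entry_inner L s.toList (List.range L) (fun i hi => List.mem_range.mp hi)
        (List.nodup_range) d hd sym' hsym').1
    have ih' := ih (List.foldl (rowStep s.toList) d (List.range L)) hd' sym hsym
    refine ⟨by simpa using ih'.1, ?_⟩
    intro j hj
    rw [List.foldl_cons, ih'.2 j hj, hinner.2 j, List.countP_cons]
    by_cases h : s.toList.getD j ' ' = sym
    · rw [if_pos ⟨List.mem_range.mpr hj, h⟩, if_pos (beq_iff_eq.mpr h)]
      push_cast
      ring
    · rw [if_neg (fun hc => h hc.2), if_neg (by simpa using h)]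
      push_cast
      ring

lemma sel_eq (f : Char → Int) (h0 : ∀ sym ∈ "ACGT".toList, 0 ≤ f sym)
    (hpos : 0 < f 'A' + f 'C' + f 'G' + f 'T') :
    (List.foldl (fun (p : Int × String) symbol =>
        if f symbol > p.1 then (f symbol, String.singleton symbol) else p)
      ((0 : Int), "") "ACGT".toList).2
    = String.singleton (PySem.List.maxD "ACGT".toList f 'A') := by
  have hA := h0 'A' (by decide)
  have hC := h0 'C' (by decide)
  have hG := h0 'G' (by decide)
  have hT := h0 'T' (by decide)
  simp only [PySem.List.maxD, PySem.List.max?, show "ACGT".toList = ['A','C','G','T'] from rfl,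
    List.foldl_cons, List.foldl_nil, Option.getD]
  by_cases h1 : f 'A' < f 'C' <;>
    simp only [h1, if_true, if_false] <;>
  [by_cases h2 : f 'C' < f 'G'; by_cases h2 : f 'A' < f 'G'] <;>
    simp only [h2, if_true, if_false] <;>
  [by_cases h3 : f 'G' < f 'T'; by_cases h3 : f 'C' < f 'T';
   by_cases h3 : f 'G' < f 'T'; by_cases h3 : f 'A' < f 'T'] <;>
    simp only [h3, if_true, if_false] <;>
    split_ifs <;> simp_all <;> omega

lemma toList_foldl_append {α : Type} (l : List α) (g : α → String) (c0 : String) :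
    (l.foldl (fun c j => c ++ g j) c0).toList = c0.toList ++ (l.map (fun j => (g j).toList)).flatten := by
  induction l generalizing c0 with
  | nil => simp
  | cons a t ih => simp [ih, String.toList_append]

def initDict (L : Nat) : PySem.Dict Char (List Int) :=
  List.foldl (fun (d : PySem.Dict Char (List Int)) symbol =>
      d.insert symbol (List.foldl (fun l (_ : Int) => l ++ [(0 : Int)]) []
        (PySem.List.pyRange 0 (L : Int))))
    PySem.Dict.empty "ACGT".toList

lemma init_entry (L : Nat) :
    ∀ sym ∈ "ACGT".toList,
      ((initDict L).getD sym []).length = L ∧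
      ∀ j : Nat, PySem.List.pyGetD ((initDict L).getD sym []) (j : Int) 0 = 0 := by
  intro sym hsym
  rw [show "ACGT".toList = ['A','C','G','T'] from rfl] at hsym
  rw [initDict, show "ACGT".toList = ['A','C','G','T'] from rfl]
  simp only [List.mem_cons, List.not_mem_nil, or_false] at hsym
  rcases hsym with h | h | h | h <;> subst h <;>
    simp [PySem.Dict.getD_insert, PySem.List.pyGetD_natCast]

lemma dict_entry (m0 : String) (rest : List String) :
    get_symbol_count_dictionary (m0 :: rest)
      = List.foldl (fun d s => List.foldl (rowStep s.toList) d (List.range m0.toList.length))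
          (initDict m0.toList.length) (m0 :: rest) := by
  rw [get_symbol_count_dictionary]
  simp only [PySem.List.pyGetD_zero_cons, PySem.Str.len_eq]
  rw [PySem.List.foldl_pyRange_zero_pyGetD (m0 :: rest) ""
    (fun d s => List.foldl (fun (d : PySem.Dict Char (List Int)) j =>
      d.modify (PySem.List.pyGetD s.toList j ' ') []
        (fun l => PySem.List.pySetD l j (PySem.List.pyGetD l j 0 + 1)))
      d (PySem.List.pyRange 0 (m0.toList.length : Int)))]
  rw [show (fun (d : PySem.Dict Char (List Int)) (s : String) =>
        List.foldl (fun (d : PySem.Dict Char (List Int)) j =>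
          d.modify (PySem.List.pyGetD s.toList j ' ') []
            (fun l => PySem.List.pySetD l j (PySem.List.pyGetD l j 0 + 1)))
          d (PySem.List.pyRange 0 (m0.toList.length : Int)))
      = (fun d s => List.foldl (rowStep s.toList) d (List.range m0.toList.length)) from
    funext fun d => funext fun s => by
      rw [PySem.List.pyRange_zero_natCast, List.foldl_map]
      exact PySem.List.foldl_congr_mem _ _ _ _ (fun acc x _ => by
        simp [rowStep, PySem.List.pyGetD_natCast])]
  rfl

lemma flatten_map_singleton {α β : Type} (l : List α) (g : α → β) :
    (l.map (fun a => [g a])).flatten = l.map g := by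
  induction l with
  | nil => rfl
  | cons a t ih => simp [ih]

lemma selStr_eq (DC : PySem.Dict Char (List Int)) (cnt : Char → Nat) (j : Int)
    (hentry : ∀ sym ∈ "ACGT".toList, PySem.List.pyGetD (DC.getD sym []) j 0 = (cnt sym : Int))
    (hpos : ∃ sym ∈ "ACGT".toList, 0 < cnt sym) :
    (List.foldl (fun (p : Int × String) symbol =>
        if PySem.List.pyGetD (DC.getD symbol []) j 0 > p.1
        then (PySem.List.pyGetD (DC.getD symbol []) j 0, String.singleton symbol)
        else p) ((0 : Int), "") "ACGT".toList).2
    = String.singleton (PySem.List.maxD "ACGT".toList (fun sym => (cnt sym : Int)) 'A') := by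
  rw [PySem.List.foldl_congr_mem _ _
    (fun (p : Int × String) symbol =>
      if (cnt symbol : Int) > p.1 then ((cnt symbol : Int), String.singleton symbol) else p) _
    (fun acc x hx => by rw [hentry x hx])]
  refine sel_eq _ (fun sym _ => Int.natCast_nonneg _) ?_
  obtain ⟨sym, hsym, hp⟩ := hpos
  rw [show "ACGT".toList = ['A','C','G','T'] from rfl] at hsym
  simp only [List.mem_cons, List.not_mem_nil, or_false] at hsym
  rcases hsym with h | h | h | h <;> subst h <;> omega

lemma colcount_eq (motifs : List String) (j : Nat) :
    (fun sym => ((motifs.map (fun s => PySem.List.pyGetD s.toList (j : Int) ' ')).count sym : Int))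
    = (fun sym => ((motifs.countP (fun s => s.toList.getD j ' ' == sym) : Nat) : Int)) := by
  funext sym
  have : (motifs.map (fun s => PySem.List.pyGetD s.toList (j : Int) ' ')).count sym
      = motifs.countP (fun s => s.toList.getD j ' ' == sym) := by
    rw [List.count_eq_countP, List.countP_map]
    refine List.countP_congr (fun s _ => ?_)
    simp [PySem.List.pyGetD_natCast]
  rw [this]

theorem pv_agree : ∀ (motifs : List String), Pre_get_candidate_regulatory_motif motifs →
    get_candidate_regulatory_motif motifs = get_candidate_regulatory_motif_alt motifs := by
  intro motifs hpre
  obtain ⟨hne, hall⟩ := hpre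
  cases motifs with
  | nil => exact absurd rfl hne
  | cons m0 rest =>
  have hall' : ∀ s ∈ m0 :: rest, m0.toList.length ≤ s.toList.length ∧
      ∀ j < m0.toList.length, s.toList.getD j ' ' ∈ "ACGT".toList := by
    simpa using hall
  have hentry : ∀ j < m0.toList.length, ∀ sym ∈ "ACGT".toList,
      PySem.List.pyGetD ((get_symbol_count_dictionary (m0 :: rest)).getD sym []) (j : Int) 0
        = (((m0 :: rest).countP (fun s => s.toList.getD j ' ' == sym) : Nat) : Int) := by
    intro j hj sym hsym
    rw [dict_entry]
    have h0 := init_entry m0.toList.length sym hsym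
    have h1 := entry_outer m0.toList.length (m0 :: rest) (initDict m0.toList.length)
      (fun sym' hsym' => (init_entry m0.toList.length sym' hsym').1) sym hsym
    rw [h1.2 j hj, h0.2 j]
    ring
  have hpos : ∀ j < m0.toList.length, ∃ sym ∈ "ACGT".toList,
      0 < (m0 :: rest).countP (fun s => s.toList.getD j ' ' == sym) := by
    intro j hj
    have hch : m0.toList.getD j ' ' ∈ "ACGT".toList := (hall' m0 (by simp)).2 j hj
    have hposc : 0 < (m0 :: rest).countP (fun s => s.toList.getD j ' ' == m0.toList.getD j ' ') := by
      rw [List.countP_pos_iff]; exact ⟨m0, by simp, by simp⟩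
    exact ⟨m0.toList.getD j ' ', hch, hposc⟩
  have hA : (get_candidate_regulatory_motif (m0 :: rest)).toList
      = (List.range m0.toList.length).map (fun j => PySem.List.maxD "ACGT".toList
          (fun sym => (((m0 :: rest).countP (fun s => s.toList.getD j ' ' == sym) : Nat) : Int)) 'A') := by
    rw [get_candidate_regulatory_motif]
    simp only [PySem.List.pyGetD_zero_cons, PySem.Str.len_eq]
    rw [PySem.List.pyRange_zero_natCast, List.foldl_map]
    rw [toList_foldl_append]
    simp only [String.toList_empty]
    rw [List.nil_append]
    revert hentry
    generalize get_symbol_count_dictionary (m0 :: rest) = DC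
    intro hentry
    have hmap : ∀ j ∈ List.range m0.toList.length,
        ((List.foldl (fun (p : Int × String) symbol =>
            if PySem.List.pyGetD (DC.getD symbol []) (j : Int) 0 > p.1
            then (PySem.List.pyGetD (DC.getD symbol []) (j : Int) 0,
              String.singleton symbol)
            else p) ((0 : Int), "") "ACGT".toList).2).toList
        = (fun j => [PySem.List.maxD "ACGT".toList
            (fun sym => (((m0 :: rest).countP (fun s => s.toList.getD j ' ' == sym) : Nat) : Int)) 'A']) j := by
      intro j hj
      have h1 := selStr_eq DC
          (fun sym => (m0 :: rest).countP (fun s => s.toList.getD j ' ' == sym)) (j : Int)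
          (hentry j (List.mem_range.mp hj)) (hpos j (List.mem_range.mp hj))
      rw [h1]
      exact String.toList_singleton _
    rw [List.map_congr_left hmap, flatten_map_singleton]
  have hB : (get_candidate_regulatory_motif_alt (m0 :: rest)).toList
      = (List.range m0.toList.length).map (fun j => PySem.List.maxD "ACGT".toList
          (fun sym => (((m0 :: rest).countP (fun s => s.toList.getD j ' ' == sym) : Nat) : Int)) 'A') := by
    rw [get_candidate_regulatory_motif_alt]
    simp only [PySem.List.pyGetD_zero_cons, PySem.Str.len_eq]
    rw [PySem.List.pyRange_zero_natCast, List.foldl_map, String.toList_ofList]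
    rw [PySem.List.foldl_append_singleton_eq_map
      (fun (k : Nat) => PySem.List.maxD "ACGT".toList
        (fun sym => (((m0 :: rest).map (fun s => PySem.List.pyGetD s.toList (k : Int) ' ')).count sym : Int)) 'A')]
    rw [List.nil_append]
    refine List.map_congr_left (fun j _ => ?_)
    rw [colcount_eq (m0 :: rest) j]
  have h2 := congrArg String.ofList (hA.trans hB.symm)
  rwa [String.ofList_toList, String.ofList_toList] at h2

-- ===== VERDICT (by name: the statement is the Claim_ definition above) =====
theorem get_candidate_regulatory_motif_spec : Claim_equal_get_candidate_regulatory_motif := by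
  intro motifs _ hpre
  unfold Spec_get_candidate_regulatory_motif
  exact pv_agree motifs hpre
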